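-- pv_equiv track=rewrite | github.com/RB-de-Vries/Knot-Table | Data_edges.py | all_representations
-- ===== SOURCE A (Python) =====
-- import copy
--
-- def all_representations(knot: list):
--     all_list = [knot]
--     len_knot = len(knot)
--     # Accounting for relabeling
--     for i in range(1, 2*len_knot):
--         knot_copy = copy.deepcopy(all_list[-1])
--         knot_copy = [[(x % (2*len_knot)) + 1 for x in sublist] for sublist in knot_copy]
--         all_list.append(sorted(knot_copy))
--
--     knot_copy = copy.deepcopy(all_list[-1])
--     # Change orientation
--     reflected = [[(2*len_knot + 1) - x for x in sublist] for sublist in knot_copy]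
--     other_orientation = [sublist[2:] + sublist[:2] for sublist in reflected]
--     all_list.append(sorted(other_orientation))
--
--     # Accounting for relabeling after changing the orientation
--     for i in range(1, 2*len_knot):
--         knot_copy = copy.deepcopy(all_list[-1])
--         knot_copy = [[(x % (2*len_knot)) + 1 for x in sublist] for sublist in knot_copy]
--         all_list.append(sorted(knot_copy))
--
--     return all_list
-- ===== SOURCE B (Python) =====
-- def all_representations(knot: list):
--     n2 = 2 * len(knot)
--     result = [knot]
--     # Each relabeled representation computed directly from the original knot with offset i
--     for i in range(1, n2):
--         result.append(sorted([[((x + i - 1) % n2) + 1 for x in sub] for sub in knot]))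
--     base = result[-1]
--     reflected = sorted([sub[2:] + sub[:2]
--                         for sub in [[(n2 + 1) - x for x in sub] for sub in base]])
--     result.append(reflected)
--     # Relabelings after reflection, each computed directly from the reflected base
--     for i in range(1, n2):
--         result.append(sorted([[((x + i - 1) % n2) + 1 for x in sub] for sub in reflected]))
--     return result
-- ===== Notes on version B (the rewrite author's own statement) =====
-- stated objective: simpler
-- what changed: Each of the 2n-1 relabeled representations is computed directly from its base (the original knot, resp. the reflected base) with an explicit offset i, instead of folding a relabel-then-sort step over the previous result; copy.deepcopy is dropped entirely.
import Mathlib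
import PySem

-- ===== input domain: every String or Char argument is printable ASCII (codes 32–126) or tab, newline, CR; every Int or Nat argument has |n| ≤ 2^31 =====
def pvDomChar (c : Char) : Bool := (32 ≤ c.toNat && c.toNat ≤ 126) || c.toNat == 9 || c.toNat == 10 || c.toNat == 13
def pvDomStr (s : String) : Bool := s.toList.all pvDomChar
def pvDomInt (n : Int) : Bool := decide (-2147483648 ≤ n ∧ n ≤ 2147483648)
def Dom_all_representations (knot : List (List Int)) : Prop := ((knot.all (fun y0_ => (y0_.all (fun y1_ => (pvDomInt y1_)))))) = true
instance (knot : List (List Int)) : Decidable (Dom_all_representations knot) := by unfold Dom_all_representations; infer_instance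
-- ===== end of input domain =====

-- B recomputes every relabeled representation directly from its base with offset i instead of
-- folding a relabel-then-sort step over the previous result; return values agree on all inputs.

-- ===== PORT A =====
-- loop body of both of A's `for i in range(1, 2*len_knot)` loops (deepcopy is the identity on values)
def pvStep (n2 : Int) (allList : List (List (List Int))) (_i : Int) : List (List (List Int)) :=
  let knotCopy := ((PySem.List.pyGet? allList (-1)).getD []).map
    (fun sub => sub.map (fun x => PySem.Int.mod x n2 + 1))
  allList ++ [PySem.List.sorted knotCopy (fun s => s) false]

def all_representations (knot : List (List Int)) : List (List (List Int)) :=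
  let lenKnot : Int := knot.length
  let all1 := (PySem.List.pyRange 1 (2 * lenKnot)).foldl (pvStep (2 * lenKnot)) [knot]
  let knotCopy := (PySem.List.pyGet? all1 (-1)).getD []
  let reflected := knotCopy.map (fun sub => sub.map (fun x => (2 * lenKnot + 1) - x))
  let otherOrientation := reflected.map
    (fun sub => PySem.List.slice sub (some 2) none ++ PySem.List.slice sub none (some 2))
  let all2 := all1 ++ [PySem.List.sorted otherOrientation (fun s => s) false]
  (PySem.List.pyRange 1 (2 * lenKnot)).foldl (pvStep (2 * lenKnot)) all2

-- ===== PORT B =====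
-- sorted([[((x + i - 1) % n2) + 1 for x in sub] for sub in src])
def pvRelab (n2 i : Int) (src : List (List Int)) : List (List Int) :=
  PySem.List.sorted (src.map (fun sub => sub.map (fun x => PySem.Int.mod (x + i - 1) n2 + 1)))
    (fun s => s) false

def all_representations_alt (knot : List (List Int)) : List (List (List Int)) :=
  let n2 : Int := 2 * knot.length
  let result := knot :: (PySem.List.pyRange 1 n2).map (fun i => pvRelab n2 i knot)
  let base := (PySem.List.pyGet? result (-1)).getD []
  let reflected := PySem.List.sorted
    ((base.map (fun sub => sub.map (fun x => (n2 + 1) - x))).map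
      (fun sub => PySem.List.slice sub (some 2) none ++ PySem.List.slice sub none (some 2)))
    (fun s => s) false
  (result ++ [reflected]) ++ (PySem.List.pyRange 1 n2).map (fun i => pvRelab n2 i reflected)

-- ===== PRECONDITION & SPEC =====
def Spec_all_representations (knot : List (List Int)) (out : List (List (List Int))) : Prop := out = all_representations_alt knot
instance (knot : List (List Int)) (out : List (List (List Int))) : Decidable (Spec_all_representations knot out) := by unfold Spec_all_representations; infer_instance

-- ===== CLAIM (what is proved, stated in full; the proofs are below) =====
def Claim_equal_all_representations : Prop := ∀ (knot : List (List Int)), Dom_all_representations knot → Spec_all_representations knot (all_representations knot)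

-- ===== LEMMAS AND PROOFS =====

-- (a % n + 1) % n = (a + 1) % n for Python mod with positive modulus
lemma pvMod_step (n2 a : Int) (h : 0 < n2) :
    PySem.Int.mod (PySem.Int.mod a n2 + 1) n2 = PySem.Int.mod (a + 1) n2 := by
  rw [PySem.Int.mod_eq_emod_of_pos h, PySem.Int.mod_eq_emod_of_pos h,
    PySem.Int.mod_eq_emod_of_pos h]
  have hx : a % n2 + 1 = (a + 1) + n2 * (-(a / n2)) := by rw [Int.emod_def]; ring
  rw [hx, Int.add_mul_emod_self_left]

lemma pvStep_last (n2 i : Int) (P : List (List (List Int))) (src : List (List Int)) :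
    pvStep n2 (P ++ [src]) i =
      (P ++ [src]) ++ [PySem.List.sorted
        (src.map (fun sub => sub.map (fun x => PySem.Int.mod x n2 + 1))) (fun s => s) false] := by
  simp [pvStep, PySem.List.pyGet?_neg_one_append_singleton]

lemma pvRelab_one (n2 : Int) (src : List (List Int)) :
    PySem.List.sorted (src.map (fun sub => sub.map (fun x => PySem.Int.mod x n2 + 1)))
      (fun s => s) false = pvRelab n2 1 src := by
  simp [pvRelab]

-- relabeling a sorted offset-j relabeling once more gives the offset-(j+1) relabeling
lemma pvSorted_map_relab (n2 : Int) (h : 0 < n2) (j : Int) (src : List (List Int)) :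
    PySem.List.sorted ((pvRelab n2 j src).map
      (fun sub => sub.map (fun x => PySem.Int.mod x n2 + 1))) (fun s => s) false =
    pvRelab n2 (j + 1) src := by
  unfold pvRelab
  have hperm := (PySem.List.sorted_perm
    (src.map (fun sub => sub.map (fun x => PySem.Int.mod (x + j - 1) n2 + 1))) (fun s => s) false).map
    (fun sub => sub.map (fun x => PySem.Int.mod x n2 + 1))
  have h2 := PySem.List.sorted_eq_sorted_of_perm _ _ (fun s => s) (fun a b hab => hab) hperm
  have hmap : (src.map (fun sub => sub.map (fun x => PySem.Int.mod (x + j - 1) n2 + 1))).map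
      (fun sub => sub.map (fun x => PySem.Int.mod x n2 + 1)) =
      src.map (fun sub => sub.map (fun x => PySem.Int.mod (x + (j + 1) - 1) n2 + 1)) := by
    rw [List.map_map]
    apply List.map_congr_left
    intro sub _
    show (sub.map _).map _ = _
    rw [List.map_map]
    apply List.map_congr_left
    intro x _
    show PySem.Int.mod (PySem.Int.mod (x + j - 1) n2 + 1) n2 + 1 = _
    rw [show x + (j + 1) - 1 = (x + j - 1) + 1 by ring, pvMod_step n2 (x + j - 1) h]
  rw [hmap] at h2
  convert h2

-- both of A's loops: folding pvStep over range(1, m) starting from … ++ [src]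
-- appends exactly the offset-i relabelings of src
lemma pvLoop (n2 : Int) (h : 0 < n2) (m : Nat) (P : List (List (List Int))) (src : List (List Int)) :
    (PySem.List.pyRange 1 (m : Int)).foldl (pvStep n2) (P ++ [src]) =
      (P ++ [src]) ++ (PySem.List.pyRange 1 (m : Int)).map (fun i => pvRelab n2 i src) := by
  induction m with
  | zero => simp [show PySem.List.pyRange 1 (0 : Int) = [] from by decide]
  | succ m ih =>
    rcases Nat.eq_zero_or_pos m with hm | hm
    · subst hm
      simp
    · rw [show ((m + 1 : Nat) : Int) = (m : Int) + 1 by push_cast; ring,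
        PySem.List.pyRange_one_succ_right (by exact_mod_cast hm), List.foldl_append]
      rw [ih]
      simp only [List.foldl_cons, List.foldl_nil, List.map_append, List.map_cons, List.map_nil]
      rcases Nat.lt_or_ge m 2 with hm2 | hm2
      · have hm1 : m = 1 := by omega
        subst hm1
        rw [show PySem.List.pyRange 1 ((1 : Nat) : Int) = [] from by decide]
        simp only [List.map_nil, List.append_nil]
        rw [pvStep_last, pvRelab_one]
        simp
      · obtain ⟨k, rfl⟩ : ∃ k, m = k + 1 := ⟨m - 1, by omega⟩
        rw [show ((k + 1 : Nat) : Int) = (k : Int) + 1 by push_cast; ring,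
          PySem.List.pyRange_one_succ_right (by exact_mod_cast (by omega : 1 ≤ k))]
        simp only [List.map_append, List.map_cons, List.map_nil, ← List.append_assoc]
        rw [pvStep_last, pvSorted_map_relab n2 h (k : Int) src]

-- ===== VERDICT (by name: the statement is the Claim_ definition above) =====
theorem all_representations_spec : Claim_equal_all_representations := by
  intro knot _
  unfold Spec_all_representations all_representations all_representations_alt
  rcases eq_or_ne knot [] with rfl | hne
  · rfl
  · have hlen : 0 < knot.length := List.length_pos_of_ne_nil hne
    have hM : (2 : Int) * (knot.length : Int) = ((2 * knot.length : Nat) : Int) := by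
      push_cast; ring
    have hpos : (0 : Int) < ((2 * knot.length : Nat) : Int) := by
      exact_mod_cast (show 0 < 2 * knot.length by omega)
    simp only [hM]
    have h1 := pvLoop _ hpos (2 * knot.length) [] knot
    simp only [List.nil_append] at h1
    rw [h1]
    simp only [List.singleton_append]
    rw [pvLoop _ hpos (2 * knot.length)]
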